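-- pv_equiv track=rewrite | github.com/IAjimi/AdventOfCode | 2016/AOC7.py | find_SSL
-- ===== SOURCE A (Python) =====
-- def aba_bab(word):
--     if len(word) == 3:
--         if (word[0] != word[1]) and (word[0] == word[2]):
--             return word
--         else:
--             return ''
--     else:
--         return ''
--
-- def find_SSL(line):
--     set1, set2 = set(), set()
--
--     for _ in range(len(line)):
--         word = line[_]
--         match = [aba_bab(word[r:r + 3]) for r in range(len(word))]  # 1 if aba_bab format, else ''
--         match = [t for t in match if t != '']
--
--         if _ % 2 == 0:  # if even (not in bracket)
--             for t in match:
--                 temp = t[1] + t[0] + t[1]  # constructing match string, if aba will return bab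
--                 set1.add(temp)
--         else:
--             for t in match:
--                 set2.add(t)
--
--     if set1.intersection(set2) != set():
--         return 1
--     else:
--         return 0
-- ===== SOURCE B (Python) =====
-- def find_SSL(line):
--     # nested direct scan, no sets: for each supernet ABA probe every hypernet
--     # word for the complementary BAB substring, with early exit
--     hypers = [line[i] for i in range(1, len(line), 2)]
--     for i in range(0, len(line), 2):
--         w = line[i]
--         for r in range(len(w) - 2):
--             if w[r] != w[r + 1] and w[r] == w[r + 2]:
--                 bab = w[r + 1] + w[r] + w[r + 1]
--                 if any(bab in v for v in hypers):
--                     return 1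
--     return 0
-- ===== Notes on version B (the rewrite author's own statement) =====
-- stated objective: alternative
-- what changed: A accumulates two sets over all words (BAB-transforms of supernet ABAs, hypernet ABAs) and tests set intersection at the end; B keeps no set at all: it scans each supernet word's length-3 windows directly and, on each valid ABA, probes every hypernet word for the complementary BAB with a substring test, returning 1 at the first hit.
import Mathlib
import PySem

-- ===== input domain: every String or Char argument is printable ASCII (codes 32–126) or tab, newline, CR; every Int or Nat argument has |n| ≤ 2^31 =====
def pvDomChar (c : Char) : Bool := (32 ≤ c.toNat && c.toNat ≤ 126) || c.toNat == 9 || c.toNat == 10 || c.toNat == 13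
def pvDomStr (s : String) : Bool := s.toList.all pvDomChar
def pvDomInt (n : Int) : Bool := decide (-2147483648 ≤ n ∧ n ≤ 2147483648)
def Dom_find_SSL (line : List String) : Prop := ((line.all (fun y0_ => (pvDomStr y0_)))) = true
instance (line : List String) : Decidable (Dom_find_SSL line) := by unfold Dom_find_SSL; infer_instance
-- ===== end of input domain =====

-- B replaces A's two accumulated sets + intersection by a direct nested scan with no set at all:
-- each supernet ABA probes every hypernet word for the complementary BAB substring, early exit ('alternative' objective).
-- ===== PORT A =====
-- words are modelled as List Char; indexing uses getD at indices the Python code reaches in range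
def abaBab (w : List Char) : List Char :=
  if w.length = 3 then
    if w.getD 0 ' ' ≠ w.getD 1 ' ' ∧ w.getD 0 ' ' = w.getD 2 ' ' then w else []
  else []

-- the 'match' list of one word: aba_bab of every slice word[r:r+3], '' entries filtered out
def matchesOf (w : List Char) : List (List Char) :=
  ((List.range w.length).map (fun r => abaBab ((w.drop r).take 3))).filter (fun t => t ≠ [])

-- one iteration of A's loop on state (set1, set2)
def stepA (st : PySem.Set (List Char) × PySem.Set (List Char)) (iw : Nat × List Char) :
    PySem.Set (List Char) × PySem.Set (List Char) :=
  if iw.1 % 2 = 0 then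
    ((matchesOf iw.2).foldl
      (fun s t => PySem.Set.add s [t.getD 1 ' ', t.getD 0 ' ', t.getD 1 ' ']) st.1, st.2)
  else
    (st.1, (matchesOf iw.2).foldl (fun s t => PySem.Set.add s t) st.2)

def find_SSL (line : List String) : Int :=
  let st := (List.range line.length).foldl
    (fun st i => stepA st (i, (line.getD i "").toList))
    ((PySem.Set.empty : PySem.Set (List Char)), (PySem.Set.empty : PySem.Set (List Char)))
  if PySem.Set.inter st.1 st.2 ≠ ([] : List (List Char)) then 1 else 0

-- ===== PORT B =====
-- inner loop of B: scan the supernet word's windows; on a valid ABA probe every hypernet word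
-- for the BAB substring ('bab in v' is PySem.Chars.isIn)
def probeWord (w : List Char) (hypers : List String) : Bool :=
  (List.range (w.length - 2)).any (fun r =>
    decide (w.getD r ' ' ≠ w.getD (r + 1) ' ') &&
    decide (w.getD r ' ' = w.getD (r + 2) ' ') &&
    hypers.any (fun v =>
      PySem.Chars.isIn [w.getD (r + 1) ' ', w.getD r ' ', w.getD (r + 1) ' '] v.toList))

def find_SSL_alt (line : List String) : Int :=
  let hypers := (PySem.List.pyRange 1 (line.length : Int) 2).map
    (fun j => PySem.List.pyGetD line j "")
  if (PySem.List.pyRange 0 (line.length : Int) 2).any (fun i =>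
      probeWord (PySem.List.pyGetD line i "").toList hypers)
  then 1 else 0

-- ===== PRECONDITION & SPEC =====
def Spec_find_SSL (line : List String) (out : Int) : Prop := out = find_SSL_alt line
instance (line : List String) (out : Int) : Decidable (Spec_find_SSL line out) := by unfold Spec_find_SSL; infer_instance

-- ===== CLAIM (what is proved, stated in full; the proofs are below) =====
def Claim_equal_find_SSL : Prop := ∀ (line : List String), Dom_find_SSL line → Spec_find_SSL line (find_SSL line)

-- ===== LEMMAS AND PROOFS =====

-- membership in a fold of unconditional adds of f
theorem mem_foldl_add_map {α β : Type} [BEq α] [LawfulBEq α]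
    (l : List β) (s : PySem.Set α) (f : β → α) (x : α) :
    x ∈ l.foldl (fun s b => PySem.Set.add s (f b)) s ↔ x ∈ s ∨ ∃ b ∈ l, x = f b := by
  induction l generalizing s with
  | nil => simp
  | cons b l ih =>
    simp only [List.foldl_cons, ih, List.mem_cons, PySem.Set.mem_add]
    constructor
    · rintro ((hx | rfl) | ⟨b', hb, rfl⟩)
      · exact Or.inl hx
      · exact Or.inr ⟨b, Or.inl rfl, rfl⟩
      · exact Or.inr ⟨b', Or.inr hb, rfl⟩
    · rintro (hx | ⟨b', (rfl | hb), rfl⟩)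
      · exact Or.inl (Or.inl hx)
      · exact Or.inl (Or.inr rfl)
      · exact Or.inr ⟨b', hb, rfl⟩

-- a length-3 window of w, explicitly
theorem window3 (w : List Char) (r : Nat) (h : r + 3 ≤ w.length) :
    (w.drop r).take 3 = [w.getD r ' ', w.getD (r + 1) ' ', w.getD (r + 2) ' '] := by
  have h0 : r < w.length := by omega
  have h1 : r + 1 < w.length := by omega
  have h2 : r + 2 < w.length := by omega
  apply List.ext_getElem
  · simp; omega
  · intro i hi hi'
    simp only [List.length_take, List.length_drop] at hi
    have : i < 3 := by simpa using hi'
    interval_cases i <;>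
      simp [List.getElem_take, List.getElem_drop, List.getD_eq_getElem?_getD, h0, h1, h2]

theorem abaBab_triple (a b c : Char) :
    abaBab [a, b, c] = if a ≠ b ∧ a = c then [a, b, c] else [] := by
  simp [abaBab]

theorem abaBab_short (w : List Char) (h : w.length ≠ 3) : abaBab w = [] := by
  simp [abaBab, h]

theorem mem_matchesOf (w : List Char) (t : List Char) :
    t ∈ matchesOf w ↔ ∃ r, r + 3 ≤ w.length ∧
      w.getD r ' ' ≠ w.getD (r + 1) ' ' ∧ w.getD r ' ' = w.getD (r + 2) ' ' ∧
      t = [w.getD r ' ', w.getD (r + 1) ' ', w.getD (r + 2) ' '] := by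
  unfold matchesOf
  rw [List.mem_filter]
  simp only [List.mem_map, List.mem_range, ne_eq, decide_not, Bool.not_eq_eq_eq_not,
    Bool.not_true, decide_eq_false_iff_not]
  constructor
  · rintro ⟨⟨r, hr, rfl⟩, hne⟩
    by_cases h3 : r + 3 ≤ w.length
    · rw [window3 w r h3, abaBab_triple] at hne ⊢
      by_cases hc : w.getD r ' ' ≠ w.getD (r + 1) ' ' ∧ w.getD r ' ' = w.getD (r + 2) ' '
      · exact ⟨r, h3, hc.1, hc.2, by rw [if_pos hc]⟩
      · rw [if_neg hc] at hne; exact absurd rfl hne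
    · exfalso
      apply hne
      apply abaBab_short
      simp only [List.length_take, List.length_drop]
      omega
  · rintro ⟨r, h3, hne, he, rfl⟩
    refine ⟨⟨r, by omega, ?_⟩, ?_⟩
    · rw [window3 w r h3, abaBab_triple, if_pos ⟨hne, he⟩]
    · simp

-- joint characterisation of A's two sets after the fold
theorem A_fold_mem (line : List String) (l : List Nat)
    (s1 s2 : PySem.Set (List Char)) (x : List Char) :
    (x ∈ (l.foldl (fun st i => stepA st (i, (line.getD i "").toList)) (s1, s2)).1 ↔
       x ∈ s1 ∨ ∃ i ∈ l, i % 2 = 0 ∧ ∃ t ∈ matchesOf (line.getD i "").toList,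
         x = [t.getD 1 ' ', t.getD 0 ' ', t.getD 1 ' ']) ∧
    (x ∈ (l.foldl (fun st i => stepA st (i, (line.getD i "").toList)) (s1, s2)).2 ↔
       x ∈ s2 ∨ ∃ i ∈ l, ¬ i % 2 = 0 ∧ x ∈ matchesOf (line.getD i "").toList) := by
  induction l generalizing s1 s2 with
  | nil => simp
  | cons i l ih =>
    simp only [List.foldl_cons, List.mem_cons]
    by_cases h : i % 2 = 0
    · rw [show stepA (s1, s2) (i, (line.getD i "").toList)
          = ((matchesOf (line.getD i "").toList).foldl
              (fun s t => PySem.Set.add s [t.getD 1 ' ', t.getD 0 ' ', t.getD 1 ' ']) s1, s2) by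
        simp [stepA, h]]
      constructor
      · rw [(ih _ _).1, mem_foldl_add_map]
        constructor
        · rintro (((hx | ⟨t, ht, rfl⟩) ) | ⟨j, hj, hje, t, ht, rfl⟩)
          · exact Or.inl hx
          · exact Or.inr ⟨i, Or.inl rfl, h, t, ht, rfl⟩
          · exact Or.inr ⟨j, Or.inr hj, hje, t, ht, rfl⟩
        · rintro (hx | ⟨j, (rfl | hj), hje, t, ht, rfl⟩)
          · exact Or.inl (Or.inl hx)
          · exact Or.inl (Or.inr ⟨t, ht, rfl⟩)
          · exact Or.inr ⟨j, hj, hje, t, ht, rfl⟩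
      · rw [(ih _ _).2]
        constructor
        · rintro (hx | ⟨j, hj, hjo, ht⟩)
          · exact Or.inl hx
          · exact Or.inr ⟨j, Or.inr hj, hjo, ht⟩
        · rintro (hx | ⟨j, (rfl | hj), hjo, ht⟩)
          · exact Or.inl hx
          · exact absurd h hjo
          · exact Or.inr ⟨j, hj, hjo, ht⟩
    · rw [show stepA (s1, s2) (i, (line.getD i "").toList)
          = (s1, (matchesOf (line.getD i "").toList).foldl
              (fun s t => PySem.Set.add s t) s2) by
        simp [stepA, h]]
      constructor
      · rw [(ih _ _).1]
        constructor
        · rintro (hx | ⟨j, hj, hje, t, ht, rfl⟩)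
          · exact Or.inl hx
          · exact Or.inr ⟨j, Or.inr hj, hje, t, ht, rfl⟩
        · rintro (hx | ⟨j, (rfl | hj), hje, t, ht, rfl⟩)
          · exact Or.inl hx
          · exact absurd hje h
          · exact Or.inr ⟨j, hj, hje, t, ht, rfl⟩
      · rw [(ih _ _).2]
        have : ∀ y, (y ∈ (matchesOf (line.getD i "").toList).foldl
            (fun s t => PySem.Set.add s t) s2 ↔
            y ∈ s2 ∨ y ∈ matchesOf (line.getD i "").toList) := by
          intro y
          simpa using mem_foldl_add_map (matchesOf (line.getD i "").toList) s2 id y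
        constructor
        · rintro (hx | ⟨j, hj, hjo, ht⟩)
          · rcases (this x).1 hx with hx | hx
            · exact Or.inl hx
            · exact Or.inr ⟨i, Or.inl rfl, h, hx⟩
          · exact Or.inr ⟨j, Or.inr hj, hjo, ht⟩
        · rintro (hx | ⟨j, (rfl | hj), hjo, ht⟩)
          · exact Or.inl ((this x).2 (Or.inl hx))
          · exact Or.inl ((this x).2 (Or.inr ht))
          · exact Or.inr ⟨j, hj, hjo, ht⟩

-- range(0, n, 2) is the even naturals below n
theorem mem_pyRange02 (n : Nat) (i : Int) :
    i ∈ PySem.List.pyRange 0 (n : Int) 2 ↔ ∃ k : Nat, k < n ∧ k % 2 = 0 ∧ i = (k : Int) := by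
  rw [PySem.List.mem_pyRange_iff_of_pos (by omega)]
  constructor
  · rintro ⟨h0, hn, hd⟩
    exact ⟨i.toNat, by omega, by omega, by omega⟩
  · rintro ⟨k, hk, hk2, rfl⟩
    refine ⟨by omega, by omega, by omega⟩

-- range(1, n, 2) is the odd naturals below n
theorem mem_pyRange12 (n : Nat) (i : Int) :
    i ∈ PySem.List.pyRange 1 (n : Int) 2 ↔ ∃ k : Nat, k < n ∧ k % 2 = 1 ∧ i = (k : Int) := by
  rw [PySem.List.mem_pyRange_iff_of_pos (by omega)]
  constructor
  · rintro ⟨h0, hn, hd⟩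
    exact ⟨i.toNat, by omega, by omega, by omega⟩
  · rintro ⟨k, hk, hk2, rfl⟩
    refine ⟨by omega, by omega, by omega⟩

-- a length-3 substring is a length-3 window
theorem infix_window3 (v : List Char) (x y z : Char) :
    [x, y, z] <:+: v ↔ ∃ r, r + 3 ≤ v.length ∧ (v.drop r).take 3 = [x, y, z] := by
  constructor
  · rintro ⟨s, t, rfl⟩
    refine ⟨s.length, by simp only [List.length_append, List.length_cons, List.length_nil]; omega, ?_⟩
    rw [List.append_assoc, List.drop_left]
    simp
  · rintro ⟨r, hr, h⟩
    refine ⟨v.take r, v.drop (r + 3), ?_⟩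
    have hdd : v.drop (r + 3) = (v.drop r).drop 3 := by
      rw [List.drop_drop]
    rw [← h, hdd, List.append_assoc, List.take_append_drop, List.take_append_drop]

-- for an ABA-shaped triple, membership in A's match list is substring containment
theorem mem_matchesOf_aba (v : List Char) (x y : Char) (hne : x ≠ y) :
    [x, y, x] ∈ matchesOf v ↔ PySem.Chars.isIn [x, y, x] v = true := by
  rw [PySem.Chars.isIn_iff_infix, infix_window3, mem_matchesOf]
  constructor
  · rintro ⟨r, h3, _, _, hx⟩
    exact ⟨r, h3, by rw [window3 v r h3, ← hx]⟩
  · rintro ⟨r, h3, hw⟩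
    rw [window3 v r h3] at hw
    obtain ⟨h1, h2, h3'⟩ : v.getD r ' ' = x ∧ v.getD (r + 1) ' ' = y ∧ v.getD (r + 2) ' ' = x := by
      simpa using hw
    exact ⟨r, h3, by rw [h1, h2]; exact hne, by rw [h1, h3'], by rw [h1, h2, h3']⟩

-- the two result conditions agree
theorem conds_iff (line : List String) :
    (PySem.Set.inter
      (((List.range line.length).foldl (fun st i => stepA st (i, (line.getD i "").toList))
        ((PySem.Set.empty : PySem.Set (List Char)), (PySem.Set.empty : PySem.Set (List Char)))).1)
      (((List.range line.length).foldl (fun st i => stepA st (i, (line.getD i "").toList))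
        ((PySem.Set.empty : PySem.Set (List Char)), (PySem.Set.empty : PySem.Set (List Char)))).2)
      ≠ ([] : List (List Char))) ↔
    ((PySem.List.pyRange 0 (line.length : Int) 2).any (fun i =>
      probeWord (PySem.List.pyGetD line i "").toList
        ((PySem.List.pyRange 1 (line.length : Int) 2).map
          (fun j => PySem.List.pyGetD line j ""))) = true) := by
  constructor
  · intro hne
    rcases List.exists_mem_of_ne_nil _ hne with ⟨xx, hx⟩
    rw [PySem.Set.mem_inter] at hx
    obtain ⟨hx1, hx2⟩ := hx
    rcases ((A_fold_mem line (List.range line.length) _ _ xx).1.1 hx1) with hx1' | ⟨i, hi, hie, t, ht, rfl⟩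
    · simp at hx1'
    rcases ((A_fold_mem line (List.range line.length) _ _ _).2.1 hx2) with hx2' | ⟨j, hj, hjo, hxj⟩
    · simp at hx2'
    rw [List.mem_range] at hi hj
    rw [mem_matchesOf] at ht
    obtain ⟨r, hr3, hne1, heq1, rfl⟩ := ht
    set w := (line.getD i "").toList with hw
    simp only [List.getD_cons_zero, List.getD_cons_succ] at hxj
    rw [List.any_eq_true]
    refine ⟨(i : Int), (mem_pyRange02 line.length (i : Int)).2 ⟨i, hi, hie, rfl⟩, ?_⟩
    rw [PySem.List.pyGetD_natCast, ← hw]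
    unfold probeWord
    rw [List.any_eq_true]
    refine ⟨r, List.mem_range.2 (by omega), ?_⟩
    simp only [Bool.and_eq_true, decide_eq_true_eq]
    refine ⟨⟨hne1, heq1⟩, ?_⟩
    rw [List.any_eq_true]
    refine ⟨line.getD j "", List.mem_map.2
      ⟨(j : Int), (mem_pyRange12 line.length (j : Int)).2 ⟨j, hj, by omega, rfl⟩,
        by rw [PySem.List.pyGetD_natCast]⟩, ?_⟩
    rw [← mem_matchesOf_aba _ _ _ (fun h => hne1 h.symm)]
    exact hxj
  · intro hB
    rw [List.any_eq_true] at hB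
    obtain ⟨ii, hii, hcond⟩ := hB
    obtain ⟨i, hi, hie, rfl⟩ := (mem_pyRange02 line.length ii).1 hii
    rw [PySem.List.pyGetD_natCast] at hcond
    set w := (line.getD i "").toList with hw
    unfold probeWord at hcond
    rw [List.any_eq_true] at hcond
    obtain ⟨r, hr, hcond⟩ := hcond
    rw [List.mem_range] at hr
    simp only [Bool.and_eq_true, decide_eq_true_eq] at hcond
    obtain ⟨⟨hne1, heq1⟩, hany⟩ := hcond
    rw [List.any_eq_true] at hany
    obtain ⟨v, hv, hisin⟩ := hany
    obtain ⟨jj, hjj, rfl⟩ := List.mem_map.1 hv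
    obtain ⟨j, hj, hjo, rfl⟩ := (mem_pyRange12 line.length jj).1 hjj
    rw [PySem.List.pyGetD_natCast] at hisin
    have hxmem : [w.getD (r + 1) ' ', w.getD r ' ', w.getD (r + 1) ' '] ∈
        matchesOf (line.getD j "").toList :=
      (mem_matchesOf_aba _ _ _ (fun h => hne1 h.symm)).2 hisin
    apply List.ne_nil_of_mem
      (a := [w.getD (r + 1) ' ', w.getD r ' ', w.getD (r + 1) ' '])
    rw [PySem.Set.mem_inter]
    constructor
    · rw [(A_fold_mem line (List.range line.length) _ _ _).1]
      refine Or.inr ⟨i, List.mem_range.2 hi, hie,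
        [w.getD r ' ', w.getD (r + 1) ' ', w.getD (r + 2) ' '], ?_, ?_⟩
      · rw [mem_matchesOf]
        have hr3 : r + 3 ≤ w.length := by omega
        exact ⟨r, hr3, hne1, heq1, rfl⟩
      · simp only [List.getD_cons_zero, List.getD_cons_succ]
    · rw [(A_fold_mem line (List.range line.length) _ _ _).2]
      exact Or.inr ⟨j, List.mem_range.2 hj, by omega, hxmem⟩

-- ===== VERDICT (by name: the statement is the Claim_ definition above) =====
theorem find_SSL_spec : Claim_equal_find_SSL := by
  intro line _
  unfold Spec_find_SSL find_SSL find_SSL_alt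
  simp only [conds_iff line]
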